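-- pv_equiv track=rewrite | github.com/konszymanski/leetcode-dataset | obfuscated_solutions/python/1611-minimum-one-bit-operations-to-make-integers-zero/solution_3_l0_l1_l2_l3.py | minimumOneBitOperations
-- ===== SOURCE A (Python) =====
-- def minimumOneBitOperations(n: int) -> int:
--     v1_718 = 0
--     if 1 + 1 == 2:
--         v2_370 = 0
--     if 1 + 1 == 2:
--         v3_926 = 1
--     while v3_926 <= n:
--         if n & v3_926:
--             v1_718 = (1 << v2_370 + 1) - 1 - v1_718
--         v3_926 = v3_926 << 1
--         v2_370 = v2_370 + 1
--     return v1_718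
-- ===== SOURCE B (Python) =====
-- def minimumOneBitOperations(n: int) -> int:
--     # inverse Gray code: XOR-fold of all right shifts of n
--     res = 0
--     while n > 0:
--         res ^= n
--         n >>= 1
--     return res
-- ===== Notes on version B (the rewrite author's own statement) =====
-- stated objective: idiomatic
-- what changed: A scans bits low-to-high keeping a bit-position counter and a growing mask, applying an alternating reflection of the accumulator at each set bit; B computes the same inverse Gray code as the idiomatic XOR fold over the successive right shifts of n, with no counter, mask or subtraction.
import Mathlib
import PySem

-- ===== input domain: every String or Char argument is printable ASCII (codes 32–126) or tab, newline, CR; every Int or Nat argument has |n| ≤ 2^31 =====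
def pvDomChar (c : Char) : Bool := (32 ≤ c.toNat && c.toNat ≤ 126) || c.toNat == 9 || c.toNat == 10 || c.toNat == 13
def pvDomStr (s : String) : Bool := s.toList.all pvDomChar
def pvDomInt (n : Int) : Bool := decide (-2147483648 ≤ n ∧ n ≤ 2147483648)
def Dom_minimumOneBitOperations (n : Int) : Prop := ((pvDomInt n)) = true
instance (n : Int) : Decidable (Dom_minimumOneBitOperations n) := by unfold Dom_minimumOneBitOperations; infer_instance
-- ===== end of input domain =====

-- ===== PORT A =====
-- B replaces A's masked bit scan with reflections by the idiomatic inverse-Gray-code XOR fold; same values everywhere.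
-- Loop of A. v2_370 (a nonnegative counter) and v3_926 (always a positive power of two) are
-- carried as Nat; the `0 < v3` conjunct only makes the recursion total and holds on every call A makes.
def pvALoop (n v1 : Int) (v2 v3 : Nat) : Int :=
  if _h : 0 < v3 ∧ (v3 : Int) ≤ n then
    pvALoop n
      (if PySem.Int.band n (v3 : Int) ≠ 0 then ((1 : Int) <<< (v2 + 1)) - 1 - v1 else v1)
      (v2 + 1) (v3 <<< 1)
  else v1
termination_by n.toNat + 1 - v3
decreasing_by
  obtain ⟨h1, h2⟩ := _h
  simp only [Nat.shiftLeft_eq, pow_one]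
  omega

def minimumOneBitOperations (n : Int) : Int := pvALoop n 0 0 1

-- ===== PORT B =====
def pvBLoop (n res : Int) : Int :=
  if _h : 0 < n then pvBLoop (n >>> (1 : Nat)) (PySem.Int.bxor res n) else res
termination_by n.toNat
decreasing_by
  have : n >>> (1 : Nat) = n / 2 := by
    simp [Int.shiftRight_eq_div_pow]
  omega

def minimumOneBitOperations_alt (n : Int) : Int := pvBLoop n 0

-- ===== PRECONDITION & SPEC =====
def Spec_minimumOneBitOperations (n : Int) (out : Int) : Prop := out = minimumOneBitOperations_alt n
instance (n : Int) (out : Int) : Decidable (Spec_minimumOneBitOperations n out) := by unfold Spec_minimumOneBitOperations; infer_instance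

-- ===== CLAIM (what is proved, stated in full; the proofs are below) =====
def Claim_equal_minimumOneBitOperations : Prop := ∀ (n : Int), Dom_minimumOneBitOperations n → Spec_minimumOneBitOperations n (minimumOneBitOperations n)

-- ===== LEMMAS AND PROOFS =====

-- Nat-level models of the two loops, plus popcount and the inverse Gray code.
def pcN (m : Nat) : Nat := if m = 0 then 0 else pcN (m / 2) + m % 2

def gN (m : Nat) : Nat := if m = 0 then 0 else m ^^^ gN (m / 2)

def aLoopN (n res k v3 : Nat) : Nat :=
  if 0 < v3 ∧ v3 ≤ n then
    aLoopN n (if n &&& v3 ≠ 0 then 2 ^ (k + 1) - 1 - res else res) (k + 1) (v3 * 2)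
  else res
termination_by n + 1 - v3

def bLoopN (n res : Nat) : Nat := if 0 < n then bLoopN (n / 2) (res ^^^ n) else res

theorem gN_div_two (m : Nat) : gN m / 2 = gN (m / 2) := by
  induction m using Nat.strong_induction_on with
  | _ m ih =>
    by_cases hm : m = 0
    · simp [hm, gN]
    · rw [gN, if_neg hm, Nat.xor_div_two, ih (m / 2) (by omega)]
      conv_rhs => rw [gN]
      by_cases h2 : m / 2 = 0
      · simp [h2, gN]
      · rw [if_neg h2]

theorem gN_mod_two (m : Nat) : gN m % 2 = pcN m % 2 := by
  induction m using Nat.strong_induction_on with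
  | _ m ih =>
    by_cases hm : m = 0
    · simp [hm, gN, pcN]
    · rw [gN, if_neg hm, pcN, if_neg hm]
      have h1 : (m ^^^ gN (m / 2)) % 2 = (m + gN (m / 2)) % 2 := Nat.xor_mod_two_eq
      have h2 := ih (m / 2) (by omega)
      omega

theorem gN_rec (m : Nat) : gN m = 2 * gN (m / 2) + pcN m % 2 := by
  have h1 := gN_div_two m
  have h2 := gN_mod_two m
  omega

theorem pcN_rec (m : Nat) (hm : m ≠ 0) : pcN m = pcN (m / 2) + m % 2 := by
  rw [pcN, if_neg hm]

theorem bLoopN_eq (m : Nat) : ∀ res, bLoopN m res = res ^^^ gN m := by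
  induction m using Nat.strong_induction_on with
  | _ m ih =>
    intro res
    by_cases hm : m = 0
    · simp [hm, bLoopN, gN]
    · rw [bLoopN, if_pos (by omega), ih (m / 2) (by omega)]
      conv_rhs => rw [gN, if_neg hm]
      rw [Nat.xor_assoc]

theorem and_two_pow_ne (n k : Nat) : (n &&& 2 ^ k ≠ 0) ↔ n / 2 ^ k % 2 = 1 := by
  rw [Nat.and_two_pow, Nat.testBit_eq_decide_div_mod_eq]
  rcases Nat.mod_two_eq_zero_or_one (n / 2 ^ k) with h | h <;> simp [h]

theorem aLoopN_eq (c : Nat) : ∀ n k res, n / 2 ^ k = c → res < 2 ^ k →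
    aLoopN n res k (2 ^ k) = 2 ^ k * gN c + (if pcN c % 2 = 1 then 2 ^ k - 1 - res else res) := by
  induction c using Nat.strong_induction_on with
  | _ c ih =>
    intro n k res hc hres
    have hpos : 0 < 2 ^ k := Nat.two_pow_pos k
    by_cases hc0 : c = 0
    · have hlt : n < 2 ^ k := by
        have := Nat.lt_of_div_eq_zero hpos (hc0 ▸ hc)
        omega
      rw [aLoopN, if_neg (by omega)]
      simp [hc0, gN, pcN]
    · have hk : 2 ^ k ≤ n := by
        by_contra hlt
        rw [Nat.div_eq_of_lt (by omega)] at hc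
        omega
      have hbit : (n &&& 2 ^ k ≠ 0) ↔ c % 2 = 1 := by rw [and_two_pow_ne, hc]
      have hc' : n / 2 ^ (k + 1) = c / 2 := by
        rw [pow_succ, ← Nat.div_div_eq_div_mul, hc]
      have hstep : 2 ^ k * 2 = 2 ^ (k + 1) := (pow_succ 2 k).symm
      have h2 : (2 : Nat) ^ (k + 1) = 2 * 2 ^ k := by rw [pow_succ]; ring
      have hrec := gN_rec c
      have hpc : pcN c = pcN (c / 2) + c % 2 := pcN_rec c hc0
      have hmul : ∀ p : Nat, 2 ^ k * (2 * gN (c / 2) + p)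
          = 2 ^ (k + 1) * gN (c / 2) + 2 ^ k * p := by
        intro p; rw [h2]; ring
      rw [aLoopN, if_pos ⟨hpos, hk⟩, hstep]
      by_cases hb : c % 2 = 1
      · rw [if_pos (hbit.mpr hb)]
        rw [ih (c / 2) (by omega) n (k + 1) _ hc' (by omega)]
        rw [hrec, hmul]
        by_cases hp : pcN (c / 2) % 2 = 1
        · have hP : pcN c % 2 = 0 := by omega
          rw [if_pos hp, if_neg (by omega), hP]
          omega
        · have hP : pcN c % 2 = 1 := by omega
          rw [if_neg hp, if_pos hP, hP]
          omega
      · rw [if_neg (by rw [hbit]; omega)]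
        rw [ih (c / 2) (by omega) n (k + 1) _ hc' (by omega)]
        rw [hrec, hmul]
        by_cases hp : pcN (c / 2) % 2 = 1
        · have hP : pcN c % 2 = 1 := by omega
          rw [if_pos hp, if_pos hP, hP]
          omega
        · have hP : pcN c % 2 = 0 := by omega
          rw [if_neg hp, if_neg (by omega), hP]
          omega

theorem aBridge (d : Nat) : ∀ (m res k v3 : Nat), m + 1 - v3 = d → res < 2 ^ (k + 1) →
    pvALoop (m : Int) (res : Int) k v3 = ((aLoopN m res k v3 : Nat) : Int) := by
  induction d using Nat.strong_induction_on with
  | _ d ih =>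
    intro m res k v3 hd hres
    rw [pvALoop, aLoopN]
    by_cases hcond : 0 < v3 ∧ v3 ≤ m
    · rw [dif_pos ⟨hcond.1, by exact_mod_cast hcond.2⟩, if_pos hcond]
      have hband : PySem.Int.band (m : Int) (v3 : Int) = ((m &&& v3 : Nat) : Int) :=
        PySem.Int.band_natCast m v3
      have hshift : ((1 : Int) <<< (k + 1)) = ((2 ^ (k + 1) : Nat) : Int) := by
        simp [Int.shiftLeft_eq]
      have hsh3 : v3 <<< 1 = v3 * 2 := by simp [Nat.shiftLeft_eq]
      have hpow : (2 : Nat) ^ (k + 1) ≤ 2 ^ (k + 1 + 1) :=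
        Nat.pow_le_pow_right (by norm_num) (by omega)
      by_cases hb : m &&& v3 ≠ 0
      · rw [if_pos (by rw [hband]; exact_mod_cast hb), if_pos hb, hshift, hsh3]
        have hcast : ((2 ^ (k + 1) : Nat) : Int) - 1 - (res : Int)
            = (((2 ^ (k + 1) - 1 - res : Nat)) : Int) := by
          omega
        rw [hcast]
        have hres2 : 2 ^ (k + 1) - 1 - res < 2 ^ (k + 1) := by
          have := Nat.two_pow_pos (k + 1)
          omega
        exact ih (m + 1 - v3 * 2) (by omega) m _ (k + 1) (v3 * 2) rfl
          (Nat.lt_of_lt_of_le hres2 hpow)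
      · rw [if_neg (by rw [hband]; exact_mod_cast hb), if_neg hb, hsh3]
        exact ih (m + 1 - v3 * 2) (by omega) m _ (k + 1) (v3 * 2) rfl
          (Nat.lt_of_lt_of_le hres hpow)
    · have hcond' : ¬(0 < v3 ∧ (v3 : Int) ≤ (m : Int)) := by
        intro h
        exact hcond ⟨h.1, by exact_mod_cast h.2⟩
      rw [dif_neg hcond', if_neg hcond]

theorem bBridge (m : Nat) : ∀ (res : Nat), pvBLoop (m : Int) (res : Int) = ((bLoopN m res : Nat) : Int) := by
  induction m using Nat.strong_induction_on with
  | _ m ih =>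
    intro res
    rw [pvBLoop, bLoopN]
    by_cases hm : 0 < m
    · have hsh : ((m : Int) >>> (1 : Nat)) = ((m / 2 : Nat) : Int) := by
        rw [Int.shiftRight_eq_div_pow]
        push_cast
        omega
      have hx : PySem.Int.bxor (res : Int) (m : Int) = ((res ^^^ m : Nat) : Int) :=
        PySem.Int.bxor_natCast res m
      rw [dif_pos (by exact_mod_cast hm), if_pos hm, hsh, hx]
      exact ih (m / 2) (by omega) (res ^^^ m)
    · rw [dif_neg (by exact_mod_cast hm), if_neg hm]

-- ===== VERDICT (by name: the statement is the Claim_ definition above) =====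
theorem minimumOneBitOperations_spec : Claim_equal_minimumOneBitOperations := by
  intro n _
  unfold Spec_minimumOneBitOperations minimumOneBitOperations minimumOneBitOperations_alt
  by_cases hn : 0 < n
  · obtain ⟨m, rfl⟩ : ∃ m : Nat, n = (m : Int) := ⟨n.toNat, by omega⟩
    have hA : pvALoop (m : Int) ((0 : Nat) : Int) 0 1 = ((aLoopN m 0 0 1 : Nat) : Int) :=
      aBridge (m + 1 - 1) m 0 0 1 rfl (by norm_num)
    have hB : pvBLoop (m : Int) ((0 : Nat) : Int) = ((bLoopN m 0 : Nat) : Int) := bBridge m 0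
    have hA2 : aLoopN m 0 0 1 = gN m := by
      have := aLoopN_eq m m 0 0 (by simp) (by norm_num)
      simpa using this
    have hB2 : bLoopN m 0 = gN m := by simpa using bLoopN_eq m 0
    simp only [Nat.cast_zero] at hA hB
    rw [hA, hB, hA2, hB2]
  · rw [pvALoop, pvBLoop]
    have hA0 : ¬(0 < (1 : Nat) ∧ (((1 : Nat) : Int)) ≤ n) := by push_cast; omega
    rw [dif_neg hA0, dif_neg hn]
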